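-- pv_equiv track=rewrite | github.com/goel-67/DT-Birck-nH-ML | src/data/data_manager.py | get_cumulative_highlight_lots
-- ===== SOURCE A (Python) =====
-- from typing import Optional, Dict, Any, List, Tuple
--
-- def get_cumulative_highlight_lots(iterations: Dict[int, List[str]],
--                                  target_iteration: int) -> List[str]:
--     """Get cumulative highlight lots up to a specific iteration"""
--     if target_iteration < 0:
--         return []
--
--     highlight_lots = []
--     for i in range(target_iteration + 1):
--         if i in iterations:
--             highlight_lots.extend(iterations[i])
--
--     return highlight_lots
-- ===== SOURCE B (Python) =====
-- def get_cumulative_highlight_lots(iterations, target_iteration):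
--     """Get cumulative highlight lots up to a specific iteration"""
--     highlight_lots = []
--     for k in sorted(set(iterations)):
--         if 0 <= k <= target_iteration:
--             highlight_lots.extend(iterations[k])
--     return highlight_lots
-- ===== Notes on version B (the rewrite author's own statement) =====
-- stated objective: alternative
-- what changed: B iterates the sorted dict keys and keeps those in [0, target_iteration] instead of scanning every integer from 0 to target_iteration and testing dict membership; it trades the integer range scan for a sort of the key set.
import Mathlib
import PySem

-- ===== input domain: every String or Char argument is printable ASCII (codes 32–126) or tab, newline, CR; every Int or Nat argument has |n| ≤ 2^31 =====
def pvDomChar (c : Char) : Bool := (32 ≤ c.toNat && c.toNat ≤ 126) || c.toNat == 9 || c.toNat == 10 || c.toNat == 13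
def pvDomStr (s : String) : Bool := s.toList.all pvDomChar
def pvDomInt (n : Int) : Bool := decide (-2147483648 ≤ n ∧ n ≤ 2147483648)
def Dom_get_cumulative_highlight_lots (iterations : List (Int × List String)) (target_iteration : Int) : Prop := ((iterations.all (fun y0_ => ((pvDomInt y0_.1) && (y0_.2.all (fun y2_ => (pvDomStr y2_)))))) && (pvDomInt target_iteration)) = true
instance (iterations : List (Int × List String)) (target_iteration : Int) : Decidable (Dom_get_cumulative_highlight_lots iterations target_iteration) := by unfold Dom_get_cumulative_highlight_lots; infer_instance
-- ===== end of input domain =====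

-- B iterates the sorted key set and keeps keys in [0, target_iteration] instead of
-- scanning every integer 0..target_iteration and testing membership (alternative algorithm).

-- dict lookup iterations[k] (first match in the association list; callers guard membership)
def pvLookup (iterations : List (Int × List String)) (k : Int) : List String :=
  ((iterations.find? (fun p => p.1 == k)).map Prod.snd).getD []

-- ===== PORT A =====
def get_cumulative_highlight_lots (iterations : List (Int × List String)) (target_iteration : Int) : List String :=
  if target_iteration < 0 then []
  else
    (PySem.List.pyRange 0 (target_iteration + 1) 1).foldl
      (fun acc i =>
        if iterations.any (fun p => p.1 == i) then acc ++ pvLookup iterations i else acc) []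

-- ===== PORT B =====
def get_cumulative_highlight_lots_alt (iterations : List (Int × List String)) (target_iteration : Int) : List String :=
  (PySem.List.sorted (PySem.Set.ofList (iterations.map Prod.fst)) (fun x => x) false).foldl
    (fun acc k =>
      if 0 ≤ k ∧ k ≤ target_iteration then acc ++ pvLookup iterations k else acc) []

-- ===== PRECONDITION & SPEC =====
def Spec_get_cumulative_highlight_lots (iterations : List (Int × List String)) (target_iteration : Int) (out : List String) : Prop := out = get_cumulative_highlight_lots_alt iterations target_iteration
instance (iterations : List (Int × List String)) (target_iteration : Int) (out : List String) : Decidable (Spec_get_cumulative_highlight_lots iterations target_iteration out) := by unfold Spec_get_cumulative_highlight_lots; infer_instance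

-- ===== CLAIM (what is proved, stated in full; the proofs are below) =====
def Claim_equal_get_cumulative_highlight_lots : Prop := ∀ (iterations : List (Int × List String)) (target_iteration : Int), Dom_get_cumulative_highlight_lots iterations target_iteration → Spec_get_cumulative_highlight_lots iterations target_iteration (get_cumulative_highlight_lots iterations target_iteration)

-- ===== LEMMAS AND PROOFS =====

-- 'for x in l: if p(x): out.extend(g(x))' is flatMap over the filtered list
theorem foldl_extend_if {α β : Type} (p : α → Prop) [DecidablePred p] (g : α → List β)
    (l : List α) (acc : List β) :
    l.foldl (fun acc x => if p x then acc ++ g x else acc) acc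
      = acc ++ (l.filter (fun x => decide (p x))).flatMap g := by
  induction l generalizing acc with
  | nil => simp
  | cons x t ih =>
    by_cases hx : p x <;> simp [hx, ih, List.append_assoc]

-- the two key lists coincide: integers of [0, t] that are keys, in increasing order
theorem key_lists_eq (iterations : List (Int × List String)) (t : Int) :
    (PySem.List.pyRange 0 (t + 1) 1).filter
        (fun i => decide (iterations.any (fun p => p.1 == i) = true))
      = (PySem.List.sorted (PySem.Set.ofList (iterations.map Prod.fst)) (fun x => x) false).filter
          (fun k => decide (0 ≤ k ∧ k ≤ t)) := by
  have hnd1 : (List.filter (fun i => decide ((iterations.any fun p => p.1 == i) = true)) (PySem.List.pyRange 0 (t + 1))).Nodup :=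
    (List.filter_sublist (l := PySem.List.pyRange 0 (t + 1))).nodup (PySem.List.nodup_pyRange_one 0 (t + 1))
  have hpw2 : (List.filter (fun k => decide (0 ≤ k ∧ k ≤ t))
      (PySem.List.sorted (PySem.Set.ofList (List.map Prod.fst iterations)) fun x => x)).Pairwise (· < ·) :=
    (PySem.List.sorted_ofList_pairwise_lt (iterations.map Prod.fst)).sublist (List.filter_sublist ..)
  have hpw1 : (List.filter (fun i => decide ((iterations.any fun p => p.1 == i) = true)) (PySem.List.pyRange 0 (t + 1))).Pairwise (· < ·) :=
    (PySem.List.pairwise_lt_pyRange_one 0 (t + 1)).sublist (List.filter_sublist ..)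
  have hperm := (List.perm_ext_iff_of_nodup hnd1 (hpw2.imp ne_of_lt)).mpr ?_
  · exact List.Perm.eq_of_pairwise (fun a b _ _ h1 h2 => le_antisymm h1 h2) (hpw1.imp le_of_lt) (hpw2.imp le_of_lt) hperm
  · intro x
    simp only [List.mem_filter, PySem.List.mem_pyRange_one, PySem.List.mem_sorted,
      PySem.Set.mem_ofList, List.any_eq_true, beq_iff_eq, decide_eq_true_eq, List.mem_map]
    constructor
    · rintro ⟨⟨h0, h1⟩, p, hp, hk⟩
      exact ⟨⟨p, hp, hk⟩, h0, by omega⟩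
    · rintro ⟨⟨p, hp, hk⟩, h0, h1⟩
      exact ⟨⟨h0, by omega⟩, p, hp, hk⟩

-- ===== VERDICT (by name: the statement is the Claim_ definition above) =====
theorem get_cumulative_highlight_lots_spec : Claim_equal_get_cumulative_highlight_lots := by
  intro iterations t _
  unfold Spec_get_cumulative_highlight_lots get_cumulative_highlight_lots get_cumulative_highlight_lots_alt
  rw [foldl_extend_if (fun i => iterations.any (fun p => p.1 == i) = true),
      foldl_extend_if (fun k => 0 ≤ k ∧ k ≤ t), key_lists_eq]
  split_ifs with h
  · -- target_iteration < 0: the filtered key list is empty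
    rw [List.filter_eq_nil_iff.mpr, List.flatMap_nil]
    · simp
    · intro k _
      simp only [decide_eq_true_eq, not_and]
      omega
  · simp
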